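-- pv_equiv track=rewrite | github.com/EnglaCM/ence7599 | KandDV1 PoD/Assignment1Algebra1.py | falskDisVL
-- ===== SOURCE A (Python) =====
-- def falskDisVL(a,b,c):
--     """ motsats till ovanstående, räknar om ingen är ss (och därmed är disjunktionen i VL falsk)
--     """
--     kombinations = []
--     res = 0
--     for s in a:
--         for f in b:
--             for p in c:
--                 kombinations.append((s,f,p))
--     for k in kombinations:
--         if "ss" not in k:
--             res += 1
--     return res
-- ===== SOURCE B (Python) =====
-- def falskDisVL(a, b, c):
--     """Same count, closed form: a triple avoids "ss" iff each component does,
--     so multiply the per-list counts of non-"ss" elements."""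
--     na = sum(1 for s in a if s != "ss")
--     nb = sum(1 for f in b if f != "ss")
--     nc = sum(1 for p in c if p != "ss")
--     return na * nb * nc
-- ===== Notes on version B (the rewrite author's own statement) =====
-- stated objective: faster
-- what changed: Replaces the materialised triple Cartesian product and its per-triple scan by the product of the per-list counts of elements different from "ss" (tuple membership in A tests element equality, not substring).
import Mathlib
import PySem

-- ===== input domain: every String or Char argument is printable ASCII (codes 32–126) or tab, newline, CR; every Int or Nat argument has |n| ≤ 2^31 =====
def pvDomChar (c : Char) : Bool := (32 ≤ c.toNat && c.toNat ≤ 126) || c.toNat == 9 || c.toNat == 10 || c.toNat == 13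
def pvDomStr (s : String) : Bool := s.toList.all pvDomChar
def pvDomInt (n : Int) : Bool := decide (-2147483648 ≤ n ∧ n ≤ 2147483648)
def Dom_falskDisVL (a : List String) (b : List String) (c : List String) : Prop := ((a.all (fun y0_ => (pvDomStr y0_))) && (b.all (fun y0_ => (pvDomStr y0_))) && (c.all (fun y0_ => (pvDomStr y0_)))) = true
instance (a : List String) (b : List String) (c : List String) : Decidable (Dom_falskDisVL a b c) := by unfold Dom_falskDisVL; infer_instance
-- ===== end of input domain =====

-- B replaces A's materialised |a|*|b|*|c| Cartesian product and per-triple scan by the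
-- product of per-list counts of elements ≠ "ss" (A's tuple membership is element equality).


-- ===== PORT A =====
-- literal port: build `kombinations` by three nested loops, then scan it counting
-- triples k with "ss" not a member (Python tuple membership = equality with a component)
def falskDisVL (a : List String) (b : List String) (c : List String) : Int :=
  let kombinations : List (String × String × String) :=
    a.foldl (fun acc s =>
      b.foldl (fun acc f =>
        c.foldl (fun acc p => acc ++ [(s, f, p)]) acc) acc) []
  kombinations.foldl (fun res k =>
    if ¬(k.1 = "ss" ∨ k.2.1 = "ss" ∨ k.2.2 = "ss") then res + 1 else res) 0

-- ===== PORT B =====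
def falskDisVL_alt (a : List String) (b : List String) (c : List String) : Int :=
  let na : Int := (a.countP (fun s => s ≠ "ss")) -- sum(1 for s in a if s != "ss")
  let nb : Int := (b.countP (fun f => f ≠ "ss"))
  let nc : Int := (c.countP (fun p => p ≠ "ss"))
  na * nb * nc

-- ===== PRECONDITION & SPEC =====
def Spec_falskDisVL (a : List String) (b : List String) (c : List String) (out : Int) : Prop := out = falskDisVL_alt a b c
instance (a : List String) (b : List String) (c : List String) (out : Int) : Decidable (Spec_falskDisVL a b c out) := by unfold Spec_falskDisVL; infer_instance

-- ===== CLAIM (what is proved, stated in full; the proofs are below) =====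
def Claim_equal_falskDisVL : Prop := ∀ (a : List String) (b : List String) (c : List String), Dom_falskDisVL a b c → Spec_falskDisVL a b c (falskDisVL a b c)

-- ===== LEMMAS AND PROOFS =====

-- the innermost loop appends the c-row for (s,f)
theorem inner_c (s f : String) (c : List String) (acc : List (String × String × String)) :
    c.foldl (fun acc p => acc ++ [(s, f, p)]) acc = acc ++ c.map (fun p => (s, f, p)) := by
  induction c generalizing acc with
  | nil => simp
  | cons p c ih => simp [List.foldl, ih]

theorem inner_b (s : String) (b c : List String) (acc : List (String × String × String)) :
    b.foldl (fun acc f => c.foldl (fun acc p => acc ++ [(s, f, p)]) acc) acc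
      = acc ++ b.flatMap (fun f => c.map (fun p => (s, f, p))) := by
  induction b generalizing acc with
  | nil => simp
  | cons f b ih =>
    rw [List.foldl_cons, inner_c, ih]
    simp [List.append_assoc]

theorem build_eq (a b c : List String) (acc : List (String × String × String)) :
    a.foldl (fun acc s =>
        b.foldl (fun acc f =>
          c.foldl (fun acc p => acc ++ [(s, f, p)]) acc) acc) acc
      = acc ++ a.flatMap (fun s => b.flatMap (fun f => c.map (fun p => (s, f, p)))) := by
  induction a generalizing acc with
  | nil => simp
  | cons s a ih =>
    rw [List.foldl_cons, inner_b, ih]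
    simp [List.append_assoc]

-- the counting loop is countP, as an Int added to the initial accumulator
theorem count_fold (P : String × String × String → Prop) [DecidablePred P]
    (l : List (String × String × String)) (init : Int) :
    l.foldl (fun res k => if P k then res + 1 else res) init
      = init + (l.countP (fun k => decide (P k)) : Int) := by
  induction l generalizing init with
  | nil => simp
  | cons k l ih =>
    simp only [List.foldl, List.countP_cons, ih]
    by_cases h : P k <;> (simp [h]; try ring)

theorem countP_row (s f : String) (c : List String) :
    (c.map (fun p => (s, f, p))).countP
        (fun k => decide ¬(k.1 = "ss" ∨ k.2.1 = "ss" ∨ k.2.2 = "ss"))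
      = if s = "ss" ∨ f = "ss" then 0 else c.countP (fun p => p ≠ "ss") := by
  induction c with
  | nil => simp
  | cons p c ih =>
    simp only [List.map, List.countP_cons, ih]
    by_cases hs : s = "ss" <;> by_cases hf : f = "ss" <;> by_cases hp : p = "ss" <;>
      simp [hs, hf, hp]

theorem countP_plane (s : String) (b c : List String) :
    ((b.flatMap (fun f => c.map (fun p => (s, f, p)))).countP
        (fun k => decide ¬(k.1 = "ss" ∨ k.2.1 = "ss" ∨ k.2.2 = "ss")))
      = if s = "ss" then 0 else b.countP (fun f => f ≠ "ss") * c.countP (fun p => p ≠ "ss") := by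
  induction b with
  | nil => simp
  | cons f b ih =>
    simp only [List.flatMap_cons, List.countP_append, ih, countP_row, List.countP_cons]
    by_cases hs : s = "ss" <;> by_cases hf : f = "ss" <;> (simp [hs, hf]; try ring)

theorem countP_total (a b c : List String) :
    ((a.flatMap (fun s => b.flatMap (fun f => c.map (fun p => (s, f, p))))).countP
        (fun k => decide ¬(k.1 = "ss" ∨ k.2.1 = "ss" ∨ k.2.2 = "ss")))
      = a.countP (fun s => s ≠ "ss") * b.countP (fun f => f ≠ "ss") * c.countP (fun p => p ≠ "ss") := by
  induction a with
  | nil => simp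
  | cons s a ih =>
    simp only [List.flatMap_cons, List.countP_append, ih, countP_plane, List.countP_cons]
    by_cases hs : s = "ss" <;> (simp [hs]; try ring)

-- ===== VERDICT (by name: the statement is the Claim_ definition above) =====
theorem falskDisVL_spec : Claim_equal_falskDisVL := by
  intro a b c _
  show falskDisVL a b c = falskDisVL_alt a b c
  unfold falskDisVL falskDisVL_alt
  simp only [build_eq, List.nil_append, count_fold, countP_total]
  push_cast
  ring
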